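-- pv_equiv track=rewrite | github.com/palemoky/eink-panel | src/todo_providers.py | parse_markdown_todo
-- ===== SOURCE A (Python) =====
-- def parse_markdown_todo(content: str) -> tuple[list[str], list[str], list[str]]:
--     """
--     解析 Markdown 格式的 TODO 列表
--
--     格式:
--     ## Goals
--     - Item 1
--     - Item 2
--
--     ## Must
--     - Item 1
--
--     ## Optional
--     - Item 1
--     """
--     goals, must, optional = [], [], []
--     current_section = None
--
--     for line in content.split("\n"):
--         line = line.strip()
--
--         # 检测章节标题
--         if line.startswith("## Goals") or line.startswith("# Goals"):
--             current_section = "goals"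
--         elif line.startswith("## Must") or line.startswith("# Must"):
--             current_section = "must"
--         elif line.startswith("## Optional") or line.startswith("# Optional"):
--             current_section = "optional"
--         # 检测列表项
--         elif line.startswith("- ") or line.startswith("* "):
--             item = line[2:].strip()
--             if not item:
--                 continue
--
--             match current_section:
--                 case "goals":
--                     goals.append(item)
--                 case "must":
--                     must.append(item)
--                 case "optional":
--                     optional.append(item)
--
--     return goals, must, optional
-- ===== SOURCE B (Python) =====
-- def parse_markdown_todo(content: str) -> tuple[list[str], list[str], list[str]]:
--     """Two-phase: cut the stripped lines into header-tagged blocks, then pull items per block."""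
--
--     def section_of(line):
--         if line.startswith("## Goals") or line.startswith("# Goals"):
--             return "goals"
--         if line.startswith("## Must") or line.startswith("# Must"):
--             return "must"
--         if line.startswith("## Optional") or line.startswith("# Optional"):
--             return "optional"
--         return None
--
--     lines = [ln.strip() for ln in content.split("\n")]
--
--     # Phase 1: group lines into blocks, each tagged with its section
--     # (the preamble before the first header is tagged None and later discarded).
--     groups = []
--     tag, buf = None, []
--     for ln in lines:
--         s = section_of(ln)
--         if s is not None:
--             groups.append((tag, buf))
--             tag, buf = s, []
--         else:
--             buf.append(ln)
--     groups.append((tag, buf))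
--
--     # Phase 2: extract the list items of one block.
--     def items(block):
--         out = []
--         for ln in block:
--             if ln.startswith("- ") or ln.startswith("* "):
--                 it = ln[2:].strip()
--                 if it:
--                     out.append(it)
--         return out
--
--     goals = [it for (s, b) in groups if s == "goals" for it in items(b)]
--     must = [it for (s, b) in groups if s == "must" for it in items(b)]
--     optional = [it for (s, b) in groups if s == "optional" for it in items(b)]
--     return goals, must, optional
-- ===== Notes on version B (the rewrite author's own statement) =====
-- stated objective: alternative
-- what changed: Replaces A's single pass with a running current_section flag by a two-phase decomposition: first cut the stripped lines into header-tagged blocks, then extract each block's list items and concatenate per section.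
import Mathlib
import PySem

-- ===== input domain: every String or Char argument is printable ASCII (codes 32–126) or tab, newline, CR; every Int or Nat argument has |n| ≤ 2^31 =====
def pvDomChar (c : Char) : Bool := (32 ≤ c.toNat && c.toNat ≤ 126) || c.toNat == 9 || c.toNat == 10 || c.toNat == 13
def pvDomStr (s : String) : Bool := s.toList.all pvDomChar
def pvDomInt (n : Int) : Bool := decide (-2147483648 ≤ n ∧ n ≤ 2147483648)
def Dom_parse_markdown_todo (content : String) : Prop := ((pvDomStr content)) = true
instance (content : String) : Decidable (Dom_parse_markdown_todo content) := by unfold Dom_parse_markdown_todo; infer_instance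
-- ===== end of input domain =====

-- B replaces A's single loop with a running current_section flag by a two-phase
-- group-then-parse decomposition (same cost; objective: alternative structure).

-- ===== PORT A =====
-- one iteration of A's for-loop: state = ((goals, must, optional), current_section)
def parse_markdown_todo_step
    (st : (List String × List String × List String) × Option String) (line0 : String) :
    (List String × List String × List String) × Option String :=
  let line := PySem.Str.strip line0
  if PySem.Str.startswith line "## Goals" || PySem.Str.startswith line "# Goals" then
    (st.1, some "goals")
  else if PySem.Str.startswith line "## Must" || PySem.Str.startswith line "# Must" then
    (st.1, some "must")
  else if PySem.Str.startswith line "## Optional" || PySem.Str.startswith line "# Optional" then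
    (st.1, some "optional")
  else if PySem.Str.startswith line "- " || PySem.Str.startswith line "* " then
    let item := PySem.Str.strip (PySem.Str.slice line (some 2) none)
    if item = "" then st
    else match st.2 with
      | some "goals" => ((st.1.1 ++ [item], st.1.2.1, st.1.2.2), st.2)
      | some "must" => ((st.1.1, st.1.2.1 ++ [item], st.1.2.2), st.2)
      | some "optional" => ((st.1.1, st.1.2.1, st.1.2.2 ++ [item]), st.2)
      | _ => st
  else st

def parse_markdown_todo (content : String) : List String × List String × List String :=
  (((PySem.Str.split? content "\n").getD []).foldl parse_markdown_todo_step (([], [], []), none)).1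

-- ===== PORT B =====
def pmtSection (line : String) : Option String :=
  if PySem.Str.startswith line "## Goals" || PySem.Str.startswith line "# Goals" then some "goals"
  else if PySem.Str.startswith line "## Must" || PySem.Str.startswith line "# Must" then some "must"
  else if PySem.Str.startswith line "## Optional" || PySem.Str.startswith line "# Optional" then some "optional"
  else none

-- phase 1: cut the line stream into blocks, each tagged with its section (preamble tagged none)
def pmtGroup : List String → Option String → List String → List (Option String × List String) →
    List (Option String × List String)
  | [], tag, buf, groups => groups ++ [(tag, buf)]
  | ln :: rest, tag, buf, groups =>
    match pmtSection ln with
    | some s => pmtGroup rest (some s) [] (groups ++ [(tag, buf)])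
    | none => pmtGroup rest tag (buf ++ [ln]) groups

-- phase 2: the list items of one block
def pmtItems (block : List String) : List String :=
  block.foldl (fun out ln =>
    if PySem.Str.startswith ln "- " || PySem.Str.startswith ln "* " then
      let it := PySem.Str.strip (PySem.Str.slice ln (some 2) none)
      if it = "" then out else out ++ [it]
    else out) []

-- the comprehension "[it for (s, b) in groups if s == name for it in items(b)]"
def pmtSelect (name : String) (groups : List (Option String × List String)) : List String :=
  groups.foldl (fun acc g => if g.1 = some name then acc ++ pmtItems g.2 else acc) []

def parse_markdown_todo_alt (content : String) : List String × List String × List String :=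
  let lines := ((PySem.Str.split? content "\n").getD []).map PySem.Str.strip
  let groups := pmtGroup lines none [] []
  (pmtSelect "goals" groups, pmtSelect "must" groups, pmtSelect "optional" groups)

-- ===== PRECONDITION & SPEC =====
def Spec_parse_markdown_todo (content : String) (out : List String × List String × List String) : Prop := out = parse_markdown_todo_alt content
instance (content : String) (out : List String × List String × List String) : Decidable (Spec_parse_markdown_todo content out) := by unfold Spec_parse_markdown_todo; infer_instance

-- ===== CLAIM (what is proved, stated in full; the proofs are below) =====
def Claim_equal_parse_markdown_todo : Prop := ∀ (content : String), Dom_parse_markdown_todo content → Spec_parse_markdown_todo content (parse_markdown_todo content)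

-- ===== LEMMAS AND PROOFS =====

-- items contributed by one (already stripped) line
def pmtLineItems (ln : String) : List String :=
  if PySem.Str.startswith ln "- " || PySem.Str.startswith ln "* " then
    let it := PySem.Str.strip (PySem.Str.slice ln (some 2) none)
    if it = "" then [] else [it]
  else []

-- append items into the slot named by the tag (the effect of A's match on current_section)
def pmtAdd (t : List String × List String × List String) (tag : Option String)
    (its : List String) : List String × List String × List String :=
  if tag = some "goals" then (t.1 ++ its, t.2.1, t.2.2)
  else if tag = some "must" then (t.1, t.2.1 ++ its, t.2.2)
  else if tag = some "optional" then (t.1, t.2.1, t.2.2 ++ its)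
  else t

def pmtGMO (groups : List (Option String × List String)) :
    List String × List String × List String :=
  (pmtSelect "goals" groups, pmtSelect "must" groups, pmtSelect "optional" groups)

def pmtAddT (t u : List String × List String × List String) :
    List String × List String × List String :=
  (t.1 ++ u.1, t.2.1 ++ u.2.1, t.2.2 ++ u.2.2)

theorem pmtAdd_nil (t : List String × List String × List String) (tag : Option String) :
    pmtAdd t tag [] = t := by
  unfold pmtAdd; split_ifs <;> simp

theorem pmtAdd_append (t : List String × List String × List String) (tag : Option String)
    (xs ys : List String) : pmtAdd t tag (xs ++ ys) = pmtAdd (pmtAdd t tag xs) tag ys := by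
  unfold pmtAdd; split_ifs <;> simp

theorem pmtItems_snoc (buf : List String) (ln : String) :
    pmtItems (buf ++ [ln]) = pmtItems buf ++ pmtLineItems ln := by
  unfold pmtItems pmtLineItems
  rw [List.foldl_append]
  simp only [List.foldl]
  split_ifs <;> simp

theorem pmtSelect_eq (name : String) (groups : List (Option String × List String))
    (acc : List String) :
    groups.foldl (fun acc g => if g.1 = some name then acc ++ pmtItems g.2 else acc) acc
      = acc ++ groups.flatMap (fun g => if g.1 = some name then pmtItems g.2 else []) := by
  induction groups generalizing acc with
  | nil => simp
  | cons g gs ih =>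
    simp only [List.foldl, List.flatMap_cons]
    by_cases h : g.1 = some name <;> simp [h, ih, List.append_assoc]

theorem pmtSelect_cons (name : String) (g : Option String × List String)
    (gs : List (Option String × List String)) :
    pmtSelect name (g :: gs)
      = (if g.1 = some name then pmtItems g.2 else []) ++ pmtSelect name gs := by
  unfold pmtSelect
  rw [pmtSelect_eq, pmtSelect_eq]
  simp [List.flatMap_cons]

theorem pmtGroup_prefix (L : List String) (tag : Option String) (buf : List String)
    (groups : List (Option String × List String)) :
    pmtGroup L tag buf groups = groups ++ pmtGroup L tag buf [] := by
  induction L generalizing tag buf groups with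
  | nil => simp [pmtGroup]
  | cons ln rest ih =>
    cases hs : pmtSection ln with
    | some s =>
      simp only [pmtGroup, hs]
      rw [ih (some s) [] (groups ++ [(tag, buf)]), ih (some s) [] ([] ++ [(tag, buf)])]
      simp
    | none =>
      simp only [pmtGroup, hs]
      exact ih ..

-- A's step on a header line sets the section and keeps the lists
theorem step_header (t : List String × List String × List String) (tag : Option String)
    (ln s : String) (hs : pmtSection (PySem.Str.strip ln) = some s) :
    parse_markdown_todo_step (t, tag) ln = (t, some s) := by
  unfold pmtSection at hs
  unfold parse_markdown_todo_step
  split_ifs at hs <;> simp_all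

-- A's step on a non-header line appends that line's items into the current slot
theorem step_nonheader (t : List String × List String × List String) (tag : Option String)
    (ln : String) (hs : pmtSection (PySem.Str.strip ln) = none) :
    parse_markdown_todo_step (t, tag) ln = (pmtAdd t tag (pmtLineItems (PySem.Str.strip ln)), tag) := by
  unfold pmtSection at hs
  split_ifs at hs with h1 h2 h3
  rw [Bool.not_eq_true] at h1 h2 h3
  unfold parse_markdown_todo_step pmtLineItems
  simp only [h1, h2, h3, Bool.false_eq_true, if_false]
  split_ifs with h4 h5
  · rw [pmtAdd_nil]
  · unfold pmtAdd; split_ifs <;> simp_all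
  · rw [pmtAdd_nil]

theorem pmtAddT_cons (t : List String × List String × List String)
    (tag : Option String) (buf : List String) (gs : List (Option String × List String)) :
    pmtAddT t (pmtGMO ((tag, buf) :: gs)) = pmtAddT (pmtAdd t tag (pmtItems buf)) (pmtGMO gs) := by
  unfold pmtGMO pmtAddT pmtAdd
  rw [pmtSelect_cons, pmtSelect_cons, pmtSelect_cons]
  split_ifs <;> simp_all

-- main loop correspondence: A's fold from a shifted state vs B's grouping of the stripped lines
theorem pmt_main (L : List String) (tag : Option String) (buf : List String)
    (t : List String × List String × List String) :
    (L.foldl parse_markdown_todo_step (pmtAdd t tag (pmtItems buf), tag)).1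
      = pmtAddT t (pmtGMO (pmtGroup (L.map PySem.Str.strip) tag buf [])) := by
  induction L generalizing tag buf t with
  | nil =>
    simp only [List.foldl, List.map_nil, pmtGroup, List.nil_append, pmtGMO]
    rw [pmtSelect_cons, pmtSelect_cons, pmtSelect_cons]
    unfold pmtAdd pmtAddT pmtSelect
    split_ifs <;> simp_all
  | cons ln rest ih =>
    cases hs : pmtSection (PySem.Str.strip ln) with
    | some s =>
      simp only [List.foldl, List.map_cons, pmtGroup, hs, List.nil_append]
      rw [step_header _ _ _ _ hs]
      have h1 : pmtAdd t tag (pmtItems buf)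
          = pmtAdd (pmtAdd t tag (pmtItems buf)) (some s) (pmtItems []) := by
        rw [show pmtItems [] = [] from rfl, pmtAdd_nil]
      rw [h1, ih (some s) [] (pmtAdd t tag (pmtItems buf)),
        pmtGroup_prefix (rest.map PySem.Str.strip) (some s) [] [(tag, buf)], List.singleton_append, pmtAddT_cons]
    | none =>
      simp only [List.foldl, List.map_cons, pmtGroup, hs]
      rw [step_nonheader _ _ _ hs, ← pmtAdd_append, ← pmtItems_snoc]
      exact ih tag (buf ++ [PySem.Str.strip ln]) t

-- ===== VERDICT (by name: the statement is the Claim_ definition above) =====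
theorem parse_markdown_todo_spec : Claim_equal_parse_markdown_todo := by
  intro content _
  unfold Spec_parse_markdown_todo parse_markdown_todo parse_markdown_todo_alt
  have h := pmt_main ((PySem.Str.split? content "\n").getD []) none [] ([], [], [])
  rw [show pmtItems [] = [] from rfl, pmtAdd_nil] at h
  rw [h]
  simp [pmtAddT, pmtGMO]
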